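-- pv_equiv track=rewrite | github.com/fineman999/Algorithm | Programmers/Kit/Graph/the_furthest_node.py | bfs
-- ===== SOURCE A (Python) =====
-- from collections import deque, Counter
--
-- def bfs(graph,visited):
--     q = deque()
--     q.append((1,1))
--     visited[1] = 1
--     while q:
--         (before_node, cnt) = q.popleft()
--         for node in graph[before_node]:
--             if not visited[node]:
--                 visited[node] = cnt + 1
--                 q.append((node, cnt + 1))
--     diary = Counter(visited)
--     return diary[max(diary.keys())]
-- ===== SOURCE B (Python) =====
-- def bfs(graph, visited):
--     # Level-synchronous BFS (no deque, no Counter): process one whole level at a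
--     # time, collecting the next frontier; mutates `visited` exactly like A.
--     visited[1] = 1
--     frontier = [1]
--     level = 1
--     while frontier:
--         nxt = []
--         for u in frontier:
--             for n in graph[u]:
--                 if not visited[n]:
--                     visited[n] = level + 1
--                     nxt.append(n)
--         level += 1
--         frontier = nxt
--     return visited[max(visited)]
-- ===== Notes on version B (the rewrite author's own statement) =====
-- stated objective: simpler
-- what changed: Replaces the deque-of-(node,count) FIFO BFS plus the Counter post-pass with a level-synchronous BFS (whole-frontier loops carrying one level counter) that mutates visited identically and returns the final dict's value at its maximum key directly, without building a Counter.
-- outside the precondition, e.g. on bfs({1: [], 2: [5]}, {2: 0}): A returns 0, B returns 0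
import Mathlib
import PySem

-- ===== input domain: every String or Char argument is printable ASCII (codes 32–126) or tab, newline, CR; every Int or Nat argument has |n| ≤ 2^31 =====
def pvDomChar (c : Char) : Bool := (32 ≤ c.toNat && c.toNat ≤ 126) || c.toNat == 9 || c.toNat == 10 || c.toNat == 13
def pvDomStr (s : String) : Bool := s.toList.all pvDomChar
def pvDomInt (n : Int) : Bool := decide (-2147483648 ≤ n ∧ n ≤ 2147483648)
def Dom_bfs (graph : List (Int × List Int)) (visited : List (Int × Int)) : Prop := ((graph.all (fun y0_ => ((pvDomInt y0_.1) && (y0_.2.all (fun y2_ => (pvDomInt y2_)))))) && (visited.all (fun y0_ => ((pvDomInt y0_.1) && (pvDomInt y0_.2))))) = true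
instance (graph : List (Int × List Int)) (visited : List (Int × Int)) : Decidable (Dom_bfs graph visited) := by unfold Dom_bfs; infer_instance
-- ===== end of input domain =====

-- B replaces A's deque-of-(node,count) BFS + Counter post-pass by a level-synchronous BFS
-- (simpler decomposition, same cost); both mutate `visited` identically in Python, the
-- equivalence proved here is about the RETURN value.


-- ===== PORT A =====
-- inner 'for node in graph[before_node]: if not visited[node]: …' loop;
-- none = KeyError on visited[node]; appends (node, cnt+1) to the queue
def bfsInnerA (cnt : Int) : List Int → PySem.Dict Int Int → List (Int × Int) → Option (PySem.Dict Int Int × List (Int × Int))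
  | [], vis, q => some (vis, q)
  | n :: rest, vis, q =>
    match vis.get? n with
    | none => none
    | some x =>
      if x = 0 then bfsInnerA cnt rest (vis.insert n (cnt + 1)) (q ++ [(n, cnt + 1)])
      else bfsInnerA cnt rest vis q

-- the 'while q' loop; none = KeyError (graph[before_node] / visited[node]) or fuel out.
-- Fuel |visited|+2 always suffices: every enqueue turns a 0-valued key of visited nonzero.
def bfsLoopA (g : PySem.Dict Int (List Int)) : Nat → List (Int × Int) → PySem.Dict Int Int → Option (PySem.Dict Int Int)
  | _, [], vis => some vis
  | 0, _ :: _, _ => none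
  | fuel + 1, (u, cnt) :: q, vis =>
    match g.get? u with
    | none => none
    | some ns =>
      match bfsInnerA cnt ns vis q with
      | none => none
      | some (vis', q') => bfsLoopA g fuel q' vis'

def bfs (graph : List (Int × List Int)) (visited : List (Int × Int)) : Int :=
  let g := PySem.Dict.ofList graph
  let vis0 := (PySem.Dict.ofList visited).insert 1 1      -- visited[1] = 1
  match bfsLoopA g (visited.length + 2) [(1, 1)] vis0 with
  | none => 0                                             -- Python raises here (outside Pre_)
  | some vis =>
    -- diary = Counter(visited): Counter(mapping) copies it (same keys in order, same values);
    -- diary[max(diary.keys())] looks up the largest key (present, so the Counter default 0 is moot)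
    match PySem.List.max? vis.keys (fun k => k) with
    | none => 0                                           -- unreachable: key 1 is always present
    | some m => vis.getD m 0

-- ===== PORT B =====
-- inner 'for n in graph[u]' loop of Source B: collects newly discovered nodes into nxt
def bfsInnerB (level : Int) : List Int → PySem.Dict Int Int → List Int → Option (PySem.Dict Int Int × List Int)
  | [], vis, nxt => some (vis, nxt)
  | n :: rest, vis, nxt =>
    match vis.get? n with
    | none => none
    | some x =>
      if x = 0 then bfsInnerB level rest (vis.insert n (level + 1)) (nxt ++ [n])
      else bfsInnerB level rest vis nxt

-- 'for u in frontier' loop of Source B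
def bfsFrontB (g : PySem.Dict Int (List Int)) (level : Int) : List Int → PySem.Dict Int Int → List Int → Option (PySem.Dict Int Int × List Int)
  | [], vis, nxt => some (vis, nxt)
  | u :: rest, vis, nxt =>
    match g.get? u with
    | none => none
    | some ns =>
      match bfsInnerB level ns vis nxt with
      | none => none
      | some (vis', nxt') => bfsFrontB g level rest vis' nxt'

-- 'while frontier' loop of Source B; fuel out = none (|visited|+2 suffices, one level needs ≥ 1 pop)
def bfsLoopB (g : PySem.Dict Int (List Int)) : Nat → List Int → Int → PySem.Dict Int Int → Option (PySem.Dict Int Int)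
  | _, [], _, vis => some vis
  | 0, _ :: _, _, _ => none
  | fuel + 1, u :: rest, level, vis =>
    match bfsFrontB g level (u :: rest) vis [] with
    | none => none
    | some (vis', nxt) => bfsLoopB g fuel nxt (level + 1) vis'

def bfs_alt (graph : List (Int × List Int)) (visited : List (Int × Int)) : Int :=
  let g := PySem.Dict.ofList graph
  let vis0 := (PySem.Dict.ofList visited).insert 1 1      -- visited[1] = 1
  match bfsLoopB g (visited.length + 2) [1] 1 vis0 with
  | none => 0                                             -- Python raises here (outside Pre_)
  | some vis =>
    -- return visited[max(visited)]
    match PySem.List.max? vis.keys (fun k => k) with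
    | none => 0                                           -- unreachable: key 1 is always present
    | some m => vis.getD m 0

-- ===== PRECONDITION & SPEC =====
-- Pre_ excludes exactly the KeyError inputs A's traversal can hit: it demands key 1 in graph and,
-- for every graph entry that is explorable (node 1 or marked 0 in visited after visited[1]=1),
-- that each listed neighbour is a key of visited, and a key of graph too when it is 0-marked.
-- This is slightly narrower than A's return set: a 0-marked entry UNREACHABLE from 1 with a
-- missing neighbour key is excluded although A never touches it (A and B agree there anyway).
def Pre_bfs (graph : List (Int × List Int)) (visited : List (Int × Int)) : Prop :=
  (PySem.Dict.ofList graph).contains 1 = true ∧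
  ∀ p ∈ graph, (p.1 = 1 ∨ ((PySem.Dict.ofList visited).insert 1 1).getD p.1 1 = 0) →
    ∀ n ∈ p.2, ((PySem.Dict.ofList visited).insert 1 1).contains n = true ∧
      (((PySem.Dict.ofList visited).insert 1 1).getD n 1 = 0 → (PySem.Dict.ofList graph).contains n = true)

instance (graph : List (Int × List Int)) (visited : List (Int × Int)) : Decidable (Pre_bfs graph visited) := by
  unfold Pre_bfs; infer_instance

def pvWitness_bfs : (List (Int × List Int)) × (List (Int × Int)) :=
  ([(1, [2, 3]), (2, [1]), (3, [1])], [(2, 0), (3, 0)])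

def Spec_bfs (graph : List (Int × List Int)) (visited : List (Int × Int)) (out : Int) : Prop := out = bfs_alt graph visited
instance (graph : List (Int × List Int)) (visited : List (Int × Int)) (out : Int) : Decidable (Spec_bfs graph visited out) := by unfold Spec_bfs; infer_instance

-- ===== CLAIM (what is proved, stated in full; the proofs are below) =====
def Claim_equal_bfs : Prop := ∀ (graph : List (Int × List Int)) (visited : List (Int × Int)), Dom_bfs graph visited → Pre_bfs graph visited → Spec_bfs graph visited (bfs graph visited)

-- ===== LEMMAS AND PROOFS =====

-- number of 0-valued entries of `vis`: the termination measure (each enqueue removes one)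
def pvZ (vis : PySem.Dict Int Int) : Nat := (vis.items.filter (fun p => p.2 == 0)).length

theorem pvZ_le_size (vis : PySem.Dict Int Int) : pvZ vis ≤ vis.size := by
  simpa [pvZ, PySem.Dict.size] using List.length_filter_le _ vis.items

theorem size_foldl_insert_le (l : List (Int × Int)) (d : PySem.Dict Int Int) :
    (l.foldl (fun d p => d.insert p.1 p.2) d).size ≤ d.size + l.length := by
  induction l generalizing d with
  | nil => simp
  | cons p rest ih =>
    simp only [List.foldl_cons, List.length_cons]
    calc (rest.foldl (fun d p => d.insert p.1 p.2) (d.insert p.1 p.2)).size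
        ≤ (d.insert p.1 p.2).size + rest.length := ih _
      _ ≤ d.size + (rest.length + 1) := by
          rw [PySem.Dict.size_insert]; split <;> omega

-- updating the unique 0-valued entry at key n to a nonzero value drops the 0-count by one
theorem filter_zero_map_update (l : List (Int × Int)) (n w : Int) (hw : w ≠ 0)
    (hnd : (l.map Prod.fst).Nodup) (hmem : (n, (0 : Int)) ∈ l) :
    ((l.map (fun p => if p.1 == n then (n, w) else p)).filter (fun p => p.2 == 0)).length + 1
      = (l.filter (fun p => p.2 == 0)).length := by
  induction l with
  | nil => cases hmem
  | cons p rest ih =>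
    rw [List.map_cons, List.nodup_cons] at hnd
    obtain ⟨hnot, hnd2⟩ := hnd
    by_cases hk : p.1 = n
    · -- p is the unique entry with key n, so p = (n, 0) and the rest is untouched
      have hp : p = (n, (0 : Int)) := by
        rcases List.mem_cons.mp hmem with h | h
        · exact h.symm
        · exact (hnot (hk ▸ List.mem_map_of_mem (f := Prod.fst) h)).elim
      have hrest : rest.map (fun q => if (q.1 == n) = true then (n, w) else q) = rest := by
        calc rest.map (fun q => if (q.1 == n) = true then (n, w) else q)
            = rest.map id := by
              apply List.map_congr_left
              intro q hq
              have hqn : q.1 ≠ n := fun h => hnot (hk ▸ h ▸ List.mem_map_of_mem (f := Prod.fst) hq)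
              simp [hqn]
          _ = rest := List.map_id rest
      rw [hp, List.map_cons, hrest]
      simp only [List.filter_cons]
      simp [hw]
    · have hmem' : (n, (0 : Int)) ∈ rest := by
        rcases List.mem_cons.mp hmem with h | h
        · exact (hk (by rw [← h])).elim
        · exact h
      have hihe := ih hnd2 hmem'
      simp only [beq_iff_eq] at hihe
      by_cases hz : p.2 = 0 <;> simp only [List.map_cons, List.filter_cons] <;>
        simp [hk, hz] <;> omega

theorem pvZ_insert (vis : PySem.Dict Int Int) (n w : Int) (hw : w ≠ 0)
    (hnd : vis.keys.Nodup) (h0 : vis.get? n = some 0) :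
    pvZ (vis.insert n w) + 1 = pvZ vis := by
  have hc : vis.contains n = true := by
    rw [PySem.Dict.contains_eq_isSome_get?, h0]; rfl
  have hmem : (n, (0 : Int)) ∈ vis.items := PySem.Dict.mem_items_of_get?_eq_some vis h0
  have : (vis.insert n w).items = vis.items.map (fun p => if p.1 == n then (n, w) else p) :=
    PySem.Dict.items_insert_of_contains vis w hc
  unfold pvZ
  rw [this]
  exact filter_zero_map_update vis.items n w hw hnd hmem

-- the two inner loops perform the same updates; A's queue is B's nxt tagged with cnt+1
theorem bfsInner_rel (cnt : Int) (ns : List Int) (vis : PySem.Dict Int Int)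
    (pre : List (Int × Int)) (nxt : List Int) :
    bfsInnerA cnt ns vis (pre ++ nxt.map (fun v => (v, cnt + 1))) =
      (bfsInnerB cnt ns vis nxt).map (fun p => (p.1, pre ++ p.2.map (fun v => (v, cnt + 1)))) := by
  induction ns generalizing vis nxt with
  | nil => simp [bfsInnerA, bfsInnerB]
  | cons n rest ih =>
    simp only [bfsInnerA, bfsInnerB]
    cases h : vis.get? n with
    | none => rfl
    | some x =>
      by_cases hx : x = 0
      · simp only [hx]
        have : pre ++ nxt.map (fun v => (v, cnt + 1)) ++ [(n, cnt + 1)]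
            = pre ++ (nxt ++ [n]).map (fun v => (v, cnt + 1)) := by simp
        rw [this]
        exact ih _ _
      · simp only [if_neg hx]
        exact ih _ _

-- the inner loop keeps keys Nodup and trades one 0-entry per collected node
theorem bfsInnerB_meas (cnt : Int) (hc : cnt + 1 ≠ 0) (ns : List Int) :
    ∀ (vis : PySem.Dict Int Int) (nxt : List Int) vis' nxt', vis.keys.Nodup →
      bfsInnerB cnt ns vis nxt = some (vis', nxt') →
      vis'.keys.Nodup ∧ nxt'.length + pvZ vis' = nxt.length + pvZ vis := by
  induction ns with
  | nil =>
    intro vis nxt vis' nxt' hnd h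
    simp only [bfsInnerB, Option.some.injEq, Prod.mk.injEq] at h
    obtain ⟨rfl, rfl⟩ := h
    exact ⟨hnd, rfl⟩
  | cons n rest ih =>
    intro vis nxt vis' nxt' hnd h
    cases h0 : vis.get? n with
    | none => simp only [bfsInnerB, h0] at h; cases h
    | some x =>
      simp only [bfsInnerB, h0] at h
      by_cases hx : x = 0
      · rw [if_pos hx] at h
        subst hx
        obtain ⟨hnd', hZ⟩ := ih (vis.insert n (cnt + 1)) (nxt ++ [n]) vis' nxt'
          (PySem.Dict.nodup_keys_insert vis n (cnt + 1) hnd) h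
        refine ⟨hnd', ?_⟩
        have := pvZ_insert vis n (cnt + 1) hc hnd h0
        simp only [List.length_append, List.length_cons, List.length_nil] at hZ
        omega
      · rw [if_neg hx] at h
        exact ih vis nxt vis' nxt' hnd h

-- one whole level: A pops cur (at level L) exactly cur.length times and ends with the queue B builds
theorem bfsFront_step (g : PySem.Dict Int (List Int)) (L : Int) (cur : List Int) :
    ∀ (nxt : List Int) (vis : PySem.Dict Int Int) (f : Nat),
      bfsLoopA g (cur.length + f) (cur.map (fun v => (v, L)) ++ nxt.map (fun v => (v, L + 1))) vis =
        match bfsFrontB g L cur vis nxt with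
        | none => none
        | some (vis', nxt') => bfsLoopA g f (nxt'.map (fun v => (v, L + 1))) vis' := by
  induction cur with
  | nil => intro nxt vis f; simp [bfsFrontB]
  | cons u rest ih =>
    intro nxt vis f
    simp only [List.map_cons, List.cons_append, List.length_cons]
    have hfuel : rest.length + f + 1 = (rest.length + f) + 1 := rfl
    rw [show rest.length + 1 + f = (rest.length + f) + 1 by omega]
    simp only [bfsLoopA, bfsFrontB]
    cases g.get? u with
    | none => rfl
    | some ns =>
      dsimp only
      rw [bfsInner_rel L ns vis (rest.map (fun v => (v, L))) nxt]
      cases bfsInnerB L ns vis nxt with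
      | none => rfl
      | some p =>
        simp only [Option.map_some]
        exact ih p.2 p.1 f

-- the frontier loop keeps keys Nodup and trades one 0-entry per collected node
theorem bfsFrontB_meas (g : PySem.Dict Int (List Int)) (L : Int) (hc : L + 1 ≠ 0) (cur : List Int) :
    ∀ (vis : PySem.Dict Int Int) (nxt : List Int) vis' nxt', vis.keys.Nodup →
      bfsFrontB g L cur vis nxt = some (vis', nxt') →
      vis'.keys.Nodup ∧ nxt'.length + pvZ vis' = nxt.length + pvZ vis := by
  induction cur with
  | nil =>
    intro vis nxt vis' nxt' hnd h
    simp only [bfsFrontB, Option.some.injEq, Prod.mk.injEq] at h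
    obtain ⟨rfl, rfl⟩ := h
    exact ⟨hnd, rfl⟩
  | cons u rest ih =>
    intro vis nxt vis' nxt' hnd h
    cases hg : g.get? u with
    | none => simp only [bfsFrontB, hg] at h; cases h
    | some ns =>
      simp only [bfsFrontB, hg] at h
      cases hi : bfsInnerB L ns vis nxt with
      | none => rw [hi] at h; cases h
      | some p =>
        rw [hi] at h
        obtain ⟨hnd1, hZ1⟩ := bfsInnerB_meas L hc ns vis nxt p.1 p.2 hnd hi
        obtain ⟨hnd2, hZ2⟩ := ih p.1 p.2 vis' nxt' hnd1 h
        exact ⟨hnd2, by omega⟩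

-- main correspondence: with enough fuel on both sides the two loops compute the same final dict
theorem bfsLoop_rel (g : PySem.Dict Int (List Int)) :
    ∀ (fb : Nat) (frontier : List Int) (L : Int) (vis : PySem.Dict Int Int) (fa : Nat),
      vis.keys.Nodup → 1 ≤ L →
      frontier.length + pvZ vis ≤ fa → frontier.length + pvZ vis ≤ fb →
      bfsLoopA g fa (frontier.map (fun v => (v, L))) vis = bfsLoopB g fb frontier L vis := by
  intro fb
  induction fb with
  | zero =>
    intro frontier L vis fa hnd hL hfa hfb
    have : frontier = [] := by
      cases frontier with
      | nil => rfl
      | cons a b => simp at hfb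
    subst this
    cases fa <;> simp [bfsLoopA, bfsLoopB]
  | succ fb ih =>
    intro frontier L vis fa hnd hL hfa hfb
    cases frontier with
    | nil => cases fa <;> simp [bfsLoopA, bfsLoopB]
    | cons u rest =>
      simp only [List.length_cons] at hfa hfb
      have hfa' : fa = (u :: rest).length + (fa - (rest.length + 1)) := by
        simp only [List.length_cons]; omega
      rw [hfa', show (u :: rest).map (fun v => (v, L))
            = (u :: rest).map (fun v => (v, L)) ++ (List.map (fun v => (v, L + 1)) []) by simp,
          bfsFront_step g L (u :: rest) [] vis (fa - (rest.length + 1))]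
      simp only [bfsLoopB]
      cases hf : bfsFrontB g L (u :: rest) vis [] with
      | none => rfl
      | some p =>
        obtain ⟨hnd', hZ⟩ := bfsFrontB_meas g L (by omega) (u :: rest) vis [] p.1 p.2 hnd hf
        simp only [List.length_nil, Nat.zero_add] at hZ
        exact ih p.2 (L + 1) p.1 (fa - (rest.length + 1)) hnd' (by omega) (by omega) (by omega)

-- ===== VERDICT (by name: the statement is the Claim_ definition above) =====
theorem bfs_spec : Claim_equal_bfs := by
  intro graph visited _hdom _hpre
  unfold Spec_bfs bfs bfs_alt
  dsimp only
  have hnd : ((PySem.Dict.ofList visited).insert 1 1).keys.Nodup :=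
    PySem.Dict.nodup_keys_insert _ 1 1 (PySem.Dict.nodup_keys_ofList visited)
  have hsize : ((PySem.Dict.ofList visited).insert 1 1).size ≤ visited.length + 1 := by
    have h1 : (PySem.Dict.ofList visited).size ≤ visited.length := by
      simpa using size_foldl_insert_le visited PySem.Dict.empty
    rw [PySem.Dict.size_insert]; split <;> omega
  have hZ : pvZ ((PySem.Dict.ofList visited).insert 1 1) ≤ visited.length + 1 :=
    le_trans (pvZ_le_size _) hsize
  have := bfsLoop_rel (PySem.Dict.ofList graph) (visited.length + 2) [1] 1
    ((PySem.Dict.ofList visited).insert 1 1) (visited.length + 2) hnd le_rfl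
    (by simp only [List.length_cons, List.length_nil]; omega)
    (by simp only [List.length_cons, List.length_nil]; omega)
  simp only [List.map_cons, List.map_nil] at this
  rw [this]
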